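-- pv_equiv track=rewrite | github.com/xiaotea/VIA | Tool/PathFind/core/utils/common.py | find_close_version
-- ===== SOURCE A (Python) =====
-- def find_close_version(s_version, s_version_list):
--     if not s_version or not s_version_list:
--         return None
--     # Find the longest common prefix
--     s_lenth = len(s_version)
--
--     for i in range(s_lenth, 0, -1):
--         char = s_version[:i]
--         for s in s_version_list:
--             if len(s) > i:
--                 continue
--             if s.startswith(char):
--                 return s
--     return None
-- ===== SOURCE B (Python) =====
-- def find_close_version(s_version, s_version_list):
--     best = None
--     best_len = 0
--     for s in s_version_list:
--         if len(s) > best_len and s_version.startswith(s):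
--             best = s
--             best_len = len(s)
--     return best
-- ===== Notes on version B (the rewrite author's own statement) =====
-- stated objective: faster
-- what changed: Replaces A's outer loop over all prefix lengths (each rescanning the whole list) with a single pass over the list keeping the longest element that is a prefix of s_version (strict '>' so empty strings and ties resolve as in A); the None guards become unnecessary.
import Mathlib
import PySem

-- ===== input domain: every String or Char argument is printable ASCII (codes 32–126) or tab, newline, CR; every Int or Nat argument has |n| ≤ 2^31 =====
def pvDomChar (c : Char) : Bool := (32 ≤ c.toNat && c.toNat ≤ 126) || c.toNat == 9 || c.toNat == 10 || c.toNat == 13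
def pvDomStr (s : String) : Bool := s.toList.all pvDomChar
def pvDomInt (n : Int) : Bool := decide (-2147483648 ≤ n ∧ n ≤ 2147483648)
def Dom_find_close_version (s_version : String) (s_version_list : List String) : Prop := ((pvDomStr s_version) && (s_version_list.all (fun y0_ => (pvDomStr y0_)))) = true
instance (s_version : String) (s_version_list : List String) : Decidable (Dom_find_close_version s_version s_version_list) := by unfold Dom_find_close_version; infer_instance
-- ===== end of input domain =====

-- B replaces A's outer loop over prefix lengths (each rescanning the list) with a single pass
-- over the list keeping the longest element that is a prefix of s_version (objective: faster, one pass instead of len(s_version) passes).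


-- ===== PORT A =====
-- inner 'for s in s_version_list: if len(s) > i: continue; if s.startswith(char): return s'
def fcvInner (char : List Char) (i : Int) : List String → Option String
  | [] => none
  | s :: rest =>
    if (s.toList.length : Int) > i then fcvInner char i rest
    else if PySem.Chars.startswith s.toList char then some s
    else fcvInner char i rest

-- outer 'for i in range(s_lenth, 0, -1): char = s_version[:i]; <inner>' with early return
def fcvOuter (v : List Char) (l : List String) : List Int → Option String
  | [] => none
  | i :: rest =>
    match fcvInner (PySem.List.slice v none (some i)) i l with
    | some s => some s
    | none => fcvOuter v l rest

def find_close_version (s_version : String) (s_version_list : List String) : Option String :=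
  if s_version.toList = [] ∨ s_version_list = [] then none
  else fcvOuter s_version.toList s_version_list
         (PySem.List.pyRange (s_version.toList.length : Int) 0 (-1))

-- ===== PORT B =====
-- single pass: best = None; best_len = 0; update when len(s) > best_len and s_version.startswith(s)
def find_close_version_alt (s_version : String) (s_version_list : List String) : Option String :=
  (s_version_list.foldl
    (fun (acc : Option String × Nat) s =>
      if s.toList.length > acc.2 ∧ PySem.Chars.startswith s_version.toList s.toList
      then (some s, s.toList.length) else acc)
    (none, 0)).1

-- ===== PRECONDITION & SPEC =====
def Spec_find_close_version (s_version : String) (s_version_list : List String) (out : Option String) : Prop := out = find_close_version_alt s_version s_version_list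
instance (s_version : String) (s_version_list : List String) (out : Option String) : Decidable (Spec_find_close_version s_version s_version_list out) := by unfold Spec_find_close_version; infer_instance

-- ===== CLAIM (what is proved, stated in full; the proofs are below) =====
def Claim_equal_find_close_version : Prop := ∀ (s_version : String) (s_version_list : List String), Dom_find_close_version s_version s_version_list → Spec_find_close_version s_version s_version_list (find_close_version s_version s_version_list)

-- ===== LEMMAS AND PROOFS =====

-- the longest length of a list element that is a prefix of v (0 if none)
def fcvM (v : List Char) : List String → Nat
  | [] => 0
  | s :: rest => if s.toList <+: v then max s.toList.length (fcvM v rest) else fcvM v rest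

theorem fcvM_le (v : List Char) (l : List String) : fcvM v l ≤ v.length := by
  induction l with
  | nil => simp [fcvM]
  | cons s rest ih =>
    simp only [fcvM]
    split_ifs with h
    · exact max_le (h.length_le) ih
    · exact ih

theorem fcvM_ge (v : List Char) (l : List String) (s : String) (hs : s ∈ l)
    (hp : s.toList <+: v) : s.toList.length ≤ fcvM v l := by
  induction l with
  | nil => cases hs
  | cons t rest ih =>
    simp only [fcvM]
    rcases List.mem_cons.mp hs with rfl | hmem
    · simp [hp]
    · split_ifs with h
      · exact le_max_of_le_right (ih hmem)
      · exact ih hmem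

theorem fcvM_exists (v : List Char) (l : List String) (h : 0 < fcvM v l) :
    ∃ s ∈ l, s.toList <+: v ∧ s.toList.length = fcvM v l := by
  induction l with
  | nil => simp [fcvM] at h
  | cons t rest ih =>
    simp only [fcvM] at h ⊢
    split_ifs at h ⊢ with hp
    · rcases le_or_gt t.toList.length (fcvM v rest) with hle | hgt
      · rw [max_eq_right hle] at h ⊢
        obtain ⟨s, hs, h1, h2⟩ := ih h
        exact ⟨s, by simp [hs], h1, h2⟩
      · rw [max_eq_left hgt.le] at h ⊢
        exact ⟨t, by simp, hp, rfl⟩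
    · obtain ⟨s, hs, h1, h2⟩ := ih h
      exact ⟨s, by simp [hs], h1, h2⟩

-- prefix of length exactly i is v.take i
theorem prefix_length_eq (v cs : List Char) (hp : cs <+: v) : cs = v.take cs.length := by
  obtain ⟨t, rfl⟩ := hp
  simp

-- A's inner loop is a find? for equality with char, when char has length i
theorem fcvInner_eq_find (v : List Char) (i : Nat) (hi : i ≤ v.length) (l : List String) :
    fcvInner (v.take i) (i : Int) l = l.find? (fun s => s.toList == v.take i) := by
  induction l with
  | nil => rfl
  | cons s rest ih =>
    simp only [fcvInner, List.find?]
    have hlen : (v.take i).length = i := by simp [hi]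
    split_ifs with h1 h2
    · -- len s > i ⇒ s ≠ take i
      have hne : (s.toList == v.take i) = false := by
        simp only [beq_eq_false_iff_ne]
        intro he; rw [he, hlen] at h1; omega
      rw [hne]; exact ih
    · -- len s ≤ i and startswith: then s.toList = v.take i
      have hp : v.take i <+: s.toList := (PySem.Chars.startswith_iff _ _).mp h2
      have heq : s.toList = v.take i :=
        (List.IsPrefix.eq_of_length_le hp (by rw [hlen]; omega)).symm
      simp [heq]
    · have hp : ¬ (v.take i <+: s.toList) := fun hh => h2 ((PySem.Chars.startswith_iff _ _).mpr hh)
      have hne : (s.toList == v.take i) = false := by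
        simp only [beq_eq_false_iff_ne]
        intro he; exact hp (he ▸ List.prefix_refl _)
      rw [hne]; exact ih

-- A's outer loop returns take (fcvM) when fcvM ≤ i ≤ len v
theorem fcvOuter_char (v : List Char) (l : List String) (i : Nat) (hi : i ≤ v.length)
    (hM : fcvM v l ≤ i) :
    fcvOuter v l (PySem.List.pyRange (i : Int) 0 (-1)) =
      if 0 < fcvM v l then some (String.ofList (v.take (fcvM v l))) else none := by
  induction i with
  | zero =>
    rw [PySem.List.pyRange_neg_one_eq_nil (by omega)]
    simp only [fcvOuter]
    rw [if_neg (by omega)]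
  | succ n ih =>
    rw [PySem.List.pyRange_neg_one_cons (by omega : (0:Int) < ((n+1 : Nat) : Int))]
    simp only [fcvOuter]
    have hsl : PySem.List.slice v none (some ((n+1 : Nat) : Int)) = v.take (n+1) :=
      PySem.List.slice_to_natCast v (n+1)
    rw [hsl, fcvInner_eq_find v (n+1) hi l]
    cases hf : l.find? (fun s => s.toList == v.take (n+1)) with
    | some s =>
      have hmem := List.mem_of_find?_eq_some hf
      have hpred := List.find?_some hf
      have heq : s.toList = v.take (n+1) := by simpa using hpred
      have hlen : s.toList.length = n+1 := by rw [heq]; simp [hi]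
      have hpre : s.toList <+: v := heq ▸ List.take_prefix _ _
      have hMeq : fcvM v l = n+1 := le_antisymm hM (hlen ▸ fcvM_ge v l s hmem hpre)
      rw [if_pos (by omega), hMeq, ← heq, String.ofList_toList]
    | none =>
      have hMne : fcvM v l ≠ n+1 := by
        intro he
        obtain ⟨s, hs, hp, hl⟩ := fcvM_exists v l (by omega)
        have heq : s.toList = v.take (n+1) := by
          rw [prefix_length_eq v s.toList hp, hl, he]
        have := List.find?_eq_none.mp hf s hs
        simp [heq] at this
      have hstep : ((n+1 : Nat) : Int) - 1 = ((n : Nat) : Int) := by push_cast; ring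
      rw [hstep]
      exact ih (by omega) (by omega)

-- B's fold: state stays in canonical form (best = some iff best_len > 0, best = take best_len)
theorem fcvB_char (v : List Char) (l : List String) (k : Nat)
    (b : Option String)
    (hb : b = if 0 < k then some (String.ofList (v.take k)) else none)
    (hk : k ≤ v.length) :
    (l.foldl
      (fun (acc : Option String × Nat) s =>
        if s.toList.length > acc.2 ∧ PySem.Chars.startswith v s.toList
        then (some s, s.toList.length) else acc)
      (b, k)) =
    (if 0 < max k (fcvM v l) then some (String.ofList (v.take (max k (fcvM v l)))) else none,
     max k (fcvM v l)) := by
  induction l generalizing b k with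
  | nil => simp [fcvM, hb]
  | cons t rest ih =>
    rw [List.foldl_cons]
    by_cases hc : t.toList.length > k ∧ PySem.Chars.startswith v t.toList = true
    · rw [if_pos hc]
      obtain ⟨hlt, hsw⟩ := hc
      have hp : t.toList <+: v := (PySem.Chars.startswith_iff _ _).mp hsw
      have hteq : t.toList = v.take t.toList.length := prefix_length_eq v t.toList hp
      have hb' : some t = if 0 < t.toList.length then some (String.ofList (v.take t.toList.length)) else none := by
        rw [if_pos (by omega), ← hteq, String.ofList_toList]
      rw [ih t.toList.length (some t) hb' hp.length_le]
      have hM : fcvM v (t :: rest) = max t.toList.length (fcvM v rest) := by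
        simp [fcvM, hp]
      rw [hM]
      have hmax : max t.toList.length (fcvM v rest) = max k (max t.toList.length (fcvM v rest)) := by
        omega
      rw [← hmax]
    · rw [if_neg hc]
      rw [ih k b hb hk]
      by_cases hpre : t.toList <+: v
      · have hle : t.toList.length ≤ k := by
          by_contra hgt
          exact hc ⟨by omega, (PySem.Chars.startswith_iff _ _).mpr hpre⟩
        have hM : fcvM v (t :: rest) = max t.toList.length (fcvM v rest) := by
          simp [fcvM, hpre]
        rw [hM]
        have hmax : max k (fcvM v rest) = max k (max t.toList.length (fcvM v rest)) := by omega
        rw [← hmax]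
      · have hM : fcvM v (t :: rest) = fcvM v rest := by simp [fcvM, hpre]
        rw [hM]

-- ===== VERDICT (by name: the statement is the Claim_ definition above) =====
theorem find_close_version_spec : Claim_equal_find_close_version := by
  intro v l _
  unfold Spec_find_close_version find_close_version find_close_version_alt
  rw [fcvB_char v.toList l 0 none (by simp) (by omega)]
  by_cases hv : v.toList = []
  · have h0 : fcvM v.toList l = 0 := by
      have h1 := fcvM_le v.toList l
      have h2 : v.toList.length = 0 := by rw [hv]; rfl
      omega
    rw [if_pos (Or.inl hv)]
    simp [h0]
  · by_cases hl : l = []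
    · subst hl
      rw [if_pos (Or.inr rfl)]
      simp [fcvM]
    · rw [if_neg (by tauto)]
      rw [fcvOuter_char v.toList l v.toList.length (le_refl _) (fcvM_le v.toList l)]
      simp
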